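-- pv_equiv track=rewrite | github.com/majakolar/rhythmic-gymnastics_automatic-analysis | src/rg_ai/utils/plotting.py | apply_minimum_frames_filter
-- ===== SOURCE A (Python) =====
-- from typing import Dict, List, Tuple
--
-- def apply_minimum_frames_filter(predictions: List[str], minimum_frames: int) -> List[str]:
--     """
--     Filter predictions by replacing sequences shorter than minimum_frames with surrounding class.
--
--     Args:
--         predictions: List of prediction strings
--         minimum_frames: Minimum consecutive frames required for a prediction to be valid
--
--     Returns:
--         Filtered list of predictions
--     """
--     if not predictions or minimum_frames <= 1:
--         return predictions
--
--     i = 0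
--     while i < len(predictions):
--         current_pred = predictions[i]
--         sequence_start = i
--
--         while i < len(predictions) and predictions[i] == current_pred:
--             i += 1
--         sequence_end = i - 1
--         sequence_length = sequence_end - sequence_start + 1
--
--         if sequence_length < minimum_frames:
--             surrounding_class = get_surrounding_class(predictions, sequence_start, sequence_end)
--             predictions[sequence_start:sequence_end + 1] = [surrounding_class] * (sequence_end - sequence_start + 1)
--
--     return predictions
--
-- def get_surrounding_class(predictions: List[str], start: int, end: int) -> str:
--     """
--     Determine the surrounding class for a sequence that needs to be replaced.
--
--     Args:
--         predictions: List of predictions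
--         start: Start index of sequence to replace
--         end: End index of sequence to replace
--
--     Returns:
--         Class name to use as replacement
--     """
--     before_class = predictions[start - 1] if start > 0 else None
--     after_class = predictions[end + 1] if end < len(predictions) - 1 else None
--
--     if before_class and after_class and before_class == after_class:
--         return before_class
--
--     if before_class and not after_class:
--         return before_class
--     if after_class and not before_class:
--         return after_class
--
--     if before_class and after_class:
--         if before_class != "No Detection":
--             return before_class
--         return after_class
--
--     return "No Detection"
-- ===== SOURCE B (Python) =====
-- # B: run-length encode once, then rewrite short runs on the run list (tracking the
-- # previous run's final value for the cascade) and expand back; mutates predictions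
-- # in place like A and returns the same object.
--
-- def _choose(before, after):
--     if before and after and before == after:
--         return before
--     if before and not after:
--         return before
--     if after and not before:
--         return after
--     if before and after:
--         return before if before != "No Detection" else after
--     return "No Detection"
--
-- def apply_minimum_frames_filter(predictions, minimum_frames):
--     if not predictions or minimum_frames <= 1:
--         return predictions
--     runs = []
--     for v in predictions:
--         if runs and runs[-1][0] == v:
--             runs[-1][1] += 1
--         else:
--             runs.append([v, 1])
--     out = []
--     prev = None
--     for idx, (v, n) in enumerate(runs):
--         if n < minimum_frames:
--             nxt = runs[idx + 1][0] if idx + 1 < len(runs) else None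
--             v = _choose(prev, nxt)
--         out.extend([v] * n)
--         prev = v
--     predictions[:] = out
--     return predictions
-- ===== Notes on version B (the rewrite author's own statement) =====
-- stated objective: alternative
-- what changed: A's in-place while-loop that rescans the live array with index arithmetic is replaced by a run-length-encode pass, a single pass over the run list that rewrites too-short runs (tracking the previous run's written value for the cascade and peeking at the next run's original value), and an expansion back; the result is written into the list in place like A.
import Mathlib
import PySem

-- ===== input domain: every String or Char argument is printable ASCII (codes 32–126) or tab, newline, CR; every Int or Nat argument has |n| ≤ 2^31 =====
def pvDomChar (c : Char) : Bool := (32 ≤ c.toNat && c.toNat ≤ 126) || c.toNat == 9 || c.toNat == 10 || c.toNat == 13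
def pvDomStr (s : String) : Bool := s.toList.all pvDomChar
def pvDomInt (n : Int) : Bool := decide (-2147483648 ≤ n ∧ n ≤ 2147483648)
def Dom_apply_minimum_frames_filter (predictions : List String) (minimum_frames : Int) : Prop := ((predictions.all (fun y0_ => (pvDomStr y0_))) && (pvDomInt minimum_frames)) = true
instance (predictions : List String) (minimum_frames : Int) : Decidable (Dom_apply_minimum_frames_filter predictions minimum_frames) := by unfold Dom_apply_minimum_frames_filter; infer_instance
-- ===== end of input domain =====

-- B replaces A's in-place rescanning while-loop by a run-length-encode / rewrite-runs /
-- expand decomposition (objective: alternative). Both Pythons mutate `predictions` in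
-- place identically and return it; the theorems are about the returned value.

-- ===== PORT A =====

-- Python truthiness of `before_class` / `after_class`: None and "" are falsy.
def pvTruthy : Option String → Bool
  | none => false
  | some s => !(s == "")

-- port of get_surrounding_class
def get_surrounding_class (predictions : List String) (start fin : Nat) : String :=
  let before : Option String := if 0 < start then some (predictions.getD (start - 1) "") else none
  let after : Option String := if fin + 1 < predictions.length then some (predictions.getD (fin + 1) "") else none
  if pvTruthy before && pvTruthy after && (before == after) then before.getD ""
  else if pvTruthy before && !pvTruthy after then before.getD ""
  else if pvTruthy after && !pvTruthy before then after.getD ""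
  else if pvTruthy before && pvTruthy after then
    (if before.getD "" ≠ "No Detection" then before.getD "" else after.getD "")
  else "No Detection"

-- the inner `while i < len(predictions) and predictions[i] == current_pred: i += 1`
def pvScanRun (l : List String) (v : String) (i : Nat) : Nat :=
  if h : i < l.length then
    (if l.getD i "" = v then pvScanRun l v (i + 1) else i)
  else i
termination_by l.length - i

-- `predictions[start:end+1] = [s] * (end - start + 1)` (equal-length slice assignment)
def pvReplaceSeg (l : List String) (s e : Nat) (v : String) : List String :=
  l.take s ++ List.replicate (e + 1 - s) v ++ l.drop (e + 1)

theorem pvScanRun_ge (l : List String) (v : String) (i : Nat) : i ≤ pvScanRun l v i := by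
  unfold pvScanRun
  split
  · split
    · exact le_trans (Nat.le_succ i) (pvScanRun_ge l v (i+1))
    · exact le_refl i
  · exact le_refl i
termination_by l.length - i

theorem pvScanRun_le (l : List String) (v : String) (i : Nat) (h : i ≤ l.length) :
    pvScanRun l v i ≤ l.length := by
  unfold pvScanRun
  split
  · split
    · exact pvScanRun_le l v (i+1) (by omega)
    · exact h
  · exact h
termination_by l.length - i

theorem pvReplaceSeg_length (l : List String) (s e : Nat) (v : String)
    (hs : s ≤ e) (he : e + 1 ≤ l.length) :
    (pvReplaceSeg l s e v).length = l.length := by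
  simp [pvReplaceSeg]
  omega

-- the outer while loop of A, state = (predictions, i)
def pvALoop (m : Int) (preds : List String) (i : Nat) : List String :=
  if h : i < preds.length then
    let v := preds.getD i ""
    let j := pvScanRun preds v (i + 1)
    let se := j - 1
    if ((j - i : Nat) : Int) < m then
      pvALoop m (pvReplaceSeg preds i se (get_surrounding_class preds i se)) j
    else
      pvALoop m preds j
  else preds
termination_by preds.length - i
decreasing_by
  · have h1 := pvScanRun_ge preds (preds.getD i "") (i+1)
    have h2 := pvScanRun_le preds (preds.getD i "") (i+1) (by omega)
    rw [pvReplaceSeg_length _ _ _ _ (by omega) (by omega)]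
    omega
  · have h1 := pvScanRun_ge preds (preds.getD i "") (i+1)
    have h2 := pvScanRun_le preds (preds.getD i "") (i+1) (by omega)
    omega

def apply_minimum_frames_filter (predictions : List String) (minimum_frames : Int) : List String :=
  if predictions = [] ∨ minimum_frames ≤ 1 then predictions
  else pvALoop minimum_frames predictions 0

-- ===== PORT B =====

-- port of _choose
def pvChoose (before after : Option String) : String :=
  if pvTruthy before && pvTruthy after && (before == after) then before.getD ""
  else if pvTruthy before && !pvTruthy after then before.getD ""
  else if pvTruthy after && !pvTruthy before then after.getD ""
  else if pvTruthy before && pvTruthy after then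
    (if before.getD "" ≠ "No Detection" then before.getD "" else after.getD "")
  else "No Detection"

-- the run-length-encoding loop of B (forward, current value + count)
def pvRleGo (cur : String) (cnt : Nat) : List String → List (String × Nat)
  | [] => [(cur, cnt)]
  | x :: xs => if x = cur then pvRleGo cur (cnt + 1) xs else (cur, cnt) :: pvRleGo x 1 xs

def pvRle : List String → List (String × Nat)
  | [] => []
  | x :: xs => pvRleGo x 1 xs

-- the rewrite-and-expand loop of B (prev = value just written for the previous run)
def pvBGo (m : Int) (prev : Option String) : List (String × Nat) → List String
  | [] => []
  | (v, n) :: rest =>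
      let v' := if (n : Int) < m then pvChoose prev (rest.head?.map Prod.fst) else v
      List.replicate n v' ++ pvBGo m (some v') rest

def apply_minimum_frames_filter_alt (predictions : List String) (minimum_frames : Int) : List String :=
  if predictions = [] ∨ minimum_frames ≤ 1 then predictions
  else pvBGo minimum_frames none (pvRle predictions)

-- ===== PRECONDITION & SPEC =====
def Spec_apply_minimum_frames_filter (predictions : List String) (minimum_frames : Int) (out : List String) : Prop := out = apply_minimum_frames_filter_alt predictions minimum_frames
instance (predictions : List String) (minimum_frames : Int) (out : List String) : Decidable (Spec_apply_minimum_frames_filter predictions minimum_frames out) := by unfold Spec_apply_minimum_frames_filter; infer_instance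

-- ===== CLAIM (what is proved, stated in full; the proofs are below) =====
def Claim_equal_apply_minimum_frames_filter : Prop := ∀ (predictions : List String) (minimum_frames : Int), Dom_apply_minimum_frames_filter predictions minimum_frames → Spec_apply_minimum_frames_filter predictions minimum_frames (apply_minimum_frames_filter predictions minimum_frames)

-- ===== LEMMAS AND PROOFS =====

-- expansion of a run list back to the flat list
def pvExpand (runs : List (String × Nat)) : List String :=
  runs.flatMap (fun p => List.replicate p.2 p.1)

-- well-formed run list: every count ≥ 1, adjacent values distinct
def pvValid : List (String × Nat) → Prop
  | [] => True
  | (v, n) :: rest =>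
      1 ≤ n ∧ (∀ w k, rest.head? = some (w, k) → v ≠ w) ∧ pvValid rest

theorem pvRleGo_head (xs : List String) (c : String) (k : Nat) :
    ∃ n t, pvRleGo c k xs = (c, n) :: t ∧ k ≤ n := by
  induction xs generalizing c k with
  | nil => exact ⟨k, [], rfl, le_refl k⟩
  | cons x xs ih =>
    by_cases h : x = c
    · obtain ⟨n, t, he, hn⟩ := ih c (k+1)
      exact ⟨n, t, by simp [pvRleGo, h, he], by omega⟩
    · exact ⟨k, pvRleGo x 1 xs, by simp [pvRleGo, h], le_refl k⟩

theorem pvValid_rleGo (xs : List String) (c : String) (k : Nat) (hk : 1 ≤ k) :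
    pvValid (pvRleGo c k xs) := by
  induction xs generalizing c k with
  | nil => exact ⟨hk, by simp, trivial⟩
  | cons x xs ih =>
    by_cases h : x = c
    · simpa [pvRleGo, h] using ih c (k+1) (by omega)
    · obtain ⟨n, t, he, _⟩ := pvRleGo_head xs x 1
      rw [pvRleGo, if_neg h]
      refine ⟨hk, ?_, ih x 1 (le_refl 1)⟩
      intro w kk hw
      rw [he] at hw
      simp at hw
      exact fun hc => h (by rw [hw.1, ← hc])

theorem pvExpand_rleGo (xs : List String) (c : String) (k : Nat) :
    pvExpand (pvRleGo c k xs) = List.replicate k c ++ xs := by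
  induction xs generalizing c k with
  | nil => simp [pvRleGo, pvExpand]
  | cons x xs ih =>
    by_cases h : x = c
    · rw [pvRleGo, if_pos h, ih, h, List.replicate_succ']
      simp
    · rw [pvRleGo, if_neg h]
      simp only [pvExpand, List.flatMap_cons] at ih ⊢
      rw [ih]
      simp

theorem pvExpand_rle (l : List String) : pvExpand (pvRle l) = l := by
  cases l with
  | nil => rfl
  | cons x xs => rw [pvRle, pvExpand_rleGo]; rfl

theorem pvValid_rle (l : List String) : pvValid (pvRle l) := by
  cases l with
  | nil => trivial
  | cons x xs => exact pvValid_rleGo xs x 1 (le_refl 1)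

theorem getD_append_length (l1 l2 : List String) (d : String) :
    (l1 ++ l2).getD l1.length d = l2.getD 0 d := by
  induction l1 with
  | nil => rfl
  | cons x xs ih => simpa using ih

theorem getD_append_lt (l1 l2 : List String) (i : Nat) (h : i < l1.length) (d : String) :
    (l1 ++ l2).getD i d = l1.getD i d := by
  simp [List.getD, List.getElem?_append_left h]

theorem pvScanRun_concat (pre mid post : List String) (v : String)
    (hmid : ∀ x ∈ mid, x = v) (hpost : ∀ w, post.head? = some w → w ≠ v) :
    pvScanRun (pre ++ mid ++ post) v pre.length = pre.length + mid.length := by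
  induction mid generalizing pre with
  | nil =>
    simp only [List.append_nil, List.length_nil, Nat.add_zero]
    rw [pvScanRun]
    split
    · rw [if_neg]
      rw [getD_append_length]
      rename_i h
      cases post with
      | nil => simp at h
      | cons w ws => exact hpost w rfl
    · rfl
  | cons x mid ih =>
    have hx : x = v := hmid x (by simp)
    have hget : (pre ++ (x :: mid) ++ post).getD pre.length "" = v := by
      rw [List.append_assoc, getD_append_length]
      exact hx
    rw [pvScanRun, dif_pos (by simp), if_pos hget]
    have h1 := ih (pre ++ [x]) (fun y hy => hmid y (by simp [hy]))
    have hassoc : (pre ++ [x]) ++ mid ++ post = pre ++ (x :: mid) ++ post := by simp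
    have hlen : (pre ++ [x]).length = pre.length + 1 := by simp
    rw [hassoc, hlen] at h1
    rw [h1]
    simp
    omega

-- the head value of the expansion of a valid run list
theorem pvExpand_head (rest : List (String × Nat)) (hv : pvValid rest) :
    (pvExpand rest).head?.map id = rest.head?.map Prod.fst ∧
      ((pvExpand rest) = [] ↔ rest = []) := by
  cases rest with
  | nil => simp [pvExpand]
  | cons p t =>
    obtain ⟨v, n⟩ := p
    obtain ⟨hn, _, _⟩ := hv
    cases n with
    | zero => omega
    | succ k => simp [pvExpand, List.replicate_succ]

-- ===== MAIN INVARIANT =====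
theorem pvALoop_bGo (m : Int) (runs : List (String × Nat)) (done : List String)
    (hv : pvValid runs) :
    pvALoop m (done ++ pvExpand runs) done.length = done ++ pvBGo m done.getLast? runs := by
  induction runs generalizing done with
  | nil =>
    rw [pvALoop]
    simp [pvExpand, pvBGo]
  | cons p rest ih =>
    obtain ⟨v, n⟩ := p
    obtain ⟨hn, hne, hrest⟩ := hv
    -- the list is done ++ replicate n v ++ expand rest
    have hexp : pvExpand ((v, n) :: rest) = List.replicate n v ++ pvExpand rest := by
      simp [pvExpand]
    set L := done ++ pvExpand ((v, n) :: rest) with hL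
    have hL' : L = (done ++ List.replicate n v) ++ pvExpand rest := by
      rw [hL, hexp, List.append_assoc]
    have hlen : done.length < L.length := by
      rw [hL, hexp]; simp; omega
    have hgetv : L.getD done.length "" = v := by
      rw [hL, hexp, getD_append_length]
      cases n with
      | zero => omega
      | succ k => simp [List.replicate_succ]
    -- the scan stops at done.length + n
    have hscan : pvScanRun L v (done.length + 1) = done.length + n := by
      have h1 : L = (done ++ [v]) ++ List.replicate (n - 1) v ++ pvExpand rest := by
        rw [hL, hexp]
        have : List.replicate n v = v :: List.replicate (n-1) v := by
          cases n with
          | zero => omega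
          | succ k => simp [List.replicate_succ]
        rw [this]; simp
      have h2 : ∀ w, (pvExpand rest).head? = some w → w ≠ v := by
        intro w hw
        obtain ⟨hhead, _⟩ := pvExpand_head rest hrest
        rw [hw] at hhead
        cases hr : rest.head? with
        | none => rw [hr] at hhead; simp at hhead
        | some q =>
          rw [hr] at hhead
          simp at hhead
          obtain ⟨w', k'⟩ := q
          have := hne w' k' hr
          simp at hhead
          rw [hhead]
          exact fun hc => this hc.symm
      have := pvScanRun_concat (done ++ [v]) (List.replicate (n-1) v) (pvExpand rest) v
        (by intro x hx; exact List.eq_of_mem_replicate hx) h2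
      rw [← h1] at this
      simp at this
      rw [this]
      omega
    -- unfold one step of pvALoop
    rw [pvALoop]
    simp only [dif_pos hlen, hgetv, hscan]
    -- both sides branch on n < m
    have hsur : get_surrounding_class L done.length (done.length + n - 1)
        = pvChoose done.getLast? (rest.head?.map Prod.fst) := by
      have hbefore : (if 0 < done.length then some (L.getD (done.length - 1) "") else none)
          = done.getLast? := by
        cases done with
        | nil => simp
        | cons d ds =>
          rw [if_pos (by simp)]
          rw [hL, getD_append_lt _ _ _ (by simp)]
          rw [List.getLast?_eq_getElem?]
          simp [List.getD]
      have hafter : (if (done.length + n - 1) + 1 < L.length then some (L.getD ((done.length + n - 1) + 1) "") else none)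
          = rest.head?.map Prod.fst := by
        have hn1 : (done.length + n - 1) + 1 = done.length + n := by omega
        rw [hn1]
        obtain ⟨hhead, hemp⟩ := pvExpand_head rest hrest
        have hlenL : L.length = done.length + n + (pvExpand rest).length := by
          rw [hL, hexp]; simp; omega
        cases hr : pvExpand rest with
        | nil =>
          rw [if_neg (by rw [hlenL, hr]; simp)]
          rw [hemp.mp hr]
          rfl
        | cons e es =>
          rw [if_pos (by rw [hlenL, hr]; simp)]
          have : L.getD (done.length + n) "" = e := by
            have hL2 : L = (done ++ List.replicate n v) ++ pvExpand rest := hL'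
            have : (done ++ List.replicate n v).length = done.length + n := by simp
            rw [hL2, ← this, getD_append_length, hr]
            rfl
          rw [this, ← hhead, hr]
          rfl
      simp only [get_surrounding_class, pvChoose]
      rw [hbefore, hafter]
    by_cases hcmp : ((done.length + n - done.length : Nat) : Int) < m
    · rw [if_pos hcmp]
      have hcmp' : (n : Int) < m := by
        have : done.length + n - done.length = n := by omega
        rwa [this] at hcmp
      -- replacement
      set v' := get_surrounding_class L done.length (done.length + n - 1) with hv'
      have hrepl : pvReplaceSeg L done.length (done.length + n - 1) v'
          = (done ++ List.replicate n v') ++ pvExpand rest := by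
        rw [pvReplaceSeg]
        have he1 : (done.length + n - 1) + 1 = done.length + n := by omega
        have he2 : done.length + n - done.length = n := by omega
        rw [he1, he2]
        have ht : L.take done.length = done := by
          rw [hL]
          exact List.take_left
        have hd : L.drop (done.length + n) = pvExpand rest := by
          rw [hL']
          have h5 : (done ++ List.replicate n v).length = done.length + n := by simp
          rw [← h5, List.drop_left]
        rw [ht, hd]
      rw [hrepl]
      have hlen2 : done.length + n = (done ++ List.replicate n v').length := by simp
      rw [hlen2, ih (done ++ List.replicate n v') hrest]
      have hlast : (done ++ List.replicate n v').getLast? = some v' := by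
        rw [List.getLast?_append_of_ne_nil _ (by simp; omega)]
        rw [List.getLast?_replicate]
        simp
        omega
      rw [hlast]
      rw [pvBGo]
      simp only [if_pos hcmp', ← hsur]
      simp
    · rw [if_neg hcmp]
      have hcmp' : ¬ (n : Int) < m := by
        have : done.length + n - done.length = n := by omega
        rwa [this] at hcmp
      have : L = (done ++ List.replicate n v) ++ pvExpand rest := hL'
      rw [this]
      have hlen2 : done.length + n = (done ++ List.replicate n v).length := by simp
      rw [hlen2, ih (done ++ List.replicate n v) hrest]
      have hlast : (done ++ List.replicate n v).getLast? = some v := by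
        rw [List.getLast?_append_of_ne_nil _ (by simp; omega)]
        rw [List.getLast?_replicate]
        simp
        omega
      rw [hlast]
      rw [pvBGo]
      simp only [if_neg hcmp']
      simp

-- ===== VERDICT (by name: the statement is the Claim_ definition above) =====
theorem apply_minimum_frames_filter_spec : Claim_equal_apply_minimum_frames_filter := by
  intro predictions minimum_frames _
  unfold Spec_apply_minimum_frames_filter
  unfold apply_minimum_frames_filter apply_minimum_frames_filter_alt
  split
  · rfl
  · have h := pvALoop_bGo minimum_frames (pvRle predictions) [] (pvValid_rle predictions)
    simp only [List.nil_append, List.length_nil, List.getLast?_nil] at h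
    rw [pvExpand_rle] at h
    exact h
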